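-- pv_equiv track=rewrite | github.com/erjantj/hackerrank | largest-range.py | helper
-- ===== SOURCE A (Python) =====
-- def helper(nums_index, num):
--     curr_range = []
--     if num-1 not in nums_index:
--         curr_range = [num,num]
--     else:
--         prev_range = helper(nums_index, num-1)
--         curr_range = [prev_range[0], num]
--     nums_index.remove(num)
--     return curr_range
-- ===== SOURCE B (Python) =====
-- def helper(nums_index, num):
--     below = sorted((v for v in set(nums_index) if v < num), reverse=True)
--     start = num
--     for v in below:
--         if v == start - 1:
--             start = v
--         else:
--             break
--     for v in range(start, num + 1):
--         nums_index.remove(v)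
--     return [start, num]
-- ===== Notes on version B (the rewrite author's own statement) =====
-- stated objective: alternative
-- what changed: Replaces A's recursive descent (each level testing membership and building [prev[0], num]) with a sort-then-scan: sort the distinct elements below num in descending order once, scan that sorted list to find the bottom of the consecutive chain, then remove the inclusive range in one pass.
import Mathlib
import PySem

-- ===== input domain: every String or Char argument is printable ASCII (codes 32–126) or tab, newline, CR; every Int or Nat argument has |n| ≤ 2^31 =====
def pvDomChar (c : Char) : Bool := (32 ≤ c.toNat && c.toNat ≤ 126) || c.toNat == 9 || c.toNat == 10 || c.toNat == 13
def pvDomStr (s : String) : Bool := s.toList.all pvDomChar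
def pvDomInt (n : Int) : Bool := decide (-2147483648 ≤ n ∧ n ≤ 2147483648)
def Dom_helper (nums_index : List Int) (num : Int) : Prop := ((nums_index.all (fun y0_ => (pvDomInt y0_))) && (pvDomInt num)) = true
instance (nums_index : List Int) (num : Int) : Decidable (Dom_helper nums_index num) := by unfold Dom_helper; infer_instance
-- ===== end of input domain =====

-- B replaces A's recursive descent with sort-then-scan (sort distinct elements below num
-- descending, scan for the consecutive chain). Equivalence is about the RETURN value only:
-- both Pythons also remove the elements start..num from nums_index in place (same multiset).

-- termination helper, cited by port A's decreasing_by (and by the proof helper pvBottom below)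
theorem pv_filter_lt (l : List Int) (num : Int) (h : (num - 1) ∈ l) :
    (l.filter (fun x => decide (x < num - 1))).length < (l.filter (fun x => decide (x < num))).length := by
  induction l with
  | nil => cases h
  | cons a t ih =>
    simp only [List.mem_cons] at h
    by_cases ha : a = num - 1
    · subst ha
      have hle : (t.filter (fun x => decide (x < num - 1))).length ≤
          (t.filter (fun x => decide (x < num))).length := by
        apply List.Sublist.length_le
        apply List.monotone_filter_right
        intro x hx
        simp only [decide_eq_true_eq] at *
        omega
      simp only [List.filter_cons]
      norm_num
      omega
    · have ht : (num - 1) ∈ t := by tauto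
      have := ih ht
      simp only [List.filter_cons]
      split_ifs with h1 h2 <;> simp_all <;> omega

-- ===== PORT A =====
-- literal port of A's recursion; the in-place remove affects only the argument, not the return value
def helper (nums_index : List Int) (num : Int) : List Int :=
  if (num - 1) ∈ nums_index then
    let prev_range := helper nums_index (num - 1)
    -- prev_range[0]: prev_range is always [x, num-1], so index 0 exists
    [(PySem.List.pyGet? prev_range 0).getD 0, num]
  else
    [num, num]
termination_by (nums_index.filter (fun x => decide (x < num))).length
decreasing_by exact pv_filter_lt _ _ (by assumption)

-- ===== PORT B =====
-- the for-loop over the sorted list (break = stop recursing)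
def pvScan (below : List Int) (start : Int) : Int :=
  match below with
  | [] => start
  | v :: rest => if v = start - 1 then pvScan rest v else start

-- sorted((v for v in set(nums_index) if v < num), reverse=True), then the scan
def helper_alt (nums_index : List Int) (num : Int) : List Int :=
  let below := PySem.List.sorted
      (PySem.Set.ofList (nums_index.filter (fun v => decide (v < num)))) (fun x => x) true
  [pvScan below num, num]

-- ===== PRECONDITION & SPEC =====
-- Pre_ excludes exactly the inputs where both Pythons raise (remove(num) with num absent).
def Pre_helper (nums_index : List Int) (num : Int) : Prop := num ∈ nums_index
instance (nums_index : List Int) (num : Int) : Decidable (Pre_helper nums_index num) := by unfold Pre_helper; infer_instance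
def pvWitness_helper : List Int × Int := ([1, 2, 3], 3)
def Spec_helper (nums_index : List Int) (num : Int) (out : List Int) : Prop := out = helper_alt nums_index num
instance (nums_index : List Int) (num : Int) (out : List Int) : Decidable (Spec_helper nums_index num out) := by unfold Spec_helper; infer_instance

-- ===== CLAIM (what is proved, stated in full; the proofs are below) =====
def Claim_equal_helper : Prop := ∀ (nums_index : List Int) (num : Int), Dom_helper nums_index num → Pre_helper nums_index num → Spec_helper nums_index num (helper nums_index num)

-- ===== LEMMAS AND PROOFS =====
-- proof-only characterisation of the chain bottom
def pvBottom (l : List Int) (s : Int) : Int :=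
  if (s - 1) ∈ l then pvBottom l (s - 1) else s
termination_by (l.filter (fun x => decide (x < s))).length
decreasing_by exact pv_filter_lt _ _ (by assumption)

theorem helper_eq_bottom (l : List Int) (num : Int) :
    helper l num = [pvBottom l num, num] := by
  induction num using helper.induct l with
  | case1 num h ih =>
    rw [helper, pvBottom]
    simp only [h, if_true, ih]
    simp [PySem.List.pyGet?, PySem.List.pyIdx?]
  | case2 num h =>
    rw [helper, pvBottom]
    simp [h]

-- the scan over any strictly-descending list of exactly the elements of l below s computes pvBottom
theorem pvScan_eq_bottom (l : List Int) :
    ∀ (L : List Int) (s : Int), L.Pairwise (fun a b => b < a) →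
      (∀ x, x ∈ L ↔ x ∈ l ∧ x < s) → pvScan L s = pvBottom l s := by
  intro L
  induction L with
  | nil =>
    intro s _ hmem
    have : (s - 1) ∉ l := by
      intro h
      have := (hmem (s - 1)).mpr ⟨h, by omega⟩
      simp at this
    rw [pvScan, pvBottom]
    simp [this]
  | cons v rest ih =>
    intro s hpw hmem
    have hvrest : ∀ x ∈ rest, x < v := by
      intro x hx; exact (List.pairwise_cons.mp hpw).1 x hx
    have hv : v ∈ l ∧ v < s := (hmem v).mp (by simp)
    by_cases hc : v = s - 1
    · have hsl : (s - 1) ∈ l := hc ▸ hv.1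
      rw [pvScan, pvBottom]
      simp only [hc, if_true, hsl]
      have := ih (s - 1) (List.pairwise_cons.mp hpw).2 (by
        intro x
        constructor
        · intro hx
          have hxL : x ∈ l ∧ x < s := (hmem x).mp (by simp [hx])
          have := hvrest x hx
          exact ⟨hxL.1, by omega⟩
        · intro ⟨hxl, hxlt⟩
          have hxL : x ∈ v :: rest := (hmem x).mpr ⟨hxl, by omega⟩
          rcases List.mem_cons.mp hxL with h | h
          · omega
          · exact h)
      simpa using this
    · have : (s - 1) ∉ l := by
        intro h
        have hin : (s - 1) ∈ v :: rest := (hmem (s - 1)).mpr ⟨h, by omega⟩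
        rcases List.mem_cons.mp hin with h1 | h1
        · exact hc h1.symm
        · have := hvrest _ h1
          omega
      rw [pvScan, pvBottom]
      simp only [this, if_false]
      split
      · omega
      · rfl

theorem alt_eq_bottom (l : List Int) (num : Int) :
    helper_alt l num = [pvBottom l num, num] := by
  unfold helper_alt
  dsimp only
  congr 1
  apply pvScan_eq_bottom
  · -- strictly descending: Pairwise ≥ from sortedness plus Nodup from ofList
    have hpw := PySem.List.sorted_pairwise_rev
      (PySem.Set.ofList (l.filter (fun v => decide (v < num)))) (fun x : Int => x)
    have hnd : (PySem.List.sorted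
        (PySem.Set.ofList (l.filter (fun v => decide (v < num)))) (fun x : Int => x) true).Nodup :=
      (PySem.List.sorted_perm _ _ _).nodup_iff.mpr
        (PySem.Set.nodup_ofList _)
    have := hnd.imp (R := fun a b : Int => a ≠ b) (fun h => h) |>.and hpw
    exact this.imp (by rintro a b ⟨hne, hle⟩; omega)
  · intro x
    rw [PySem.List.mem_sorted, PySem.Set.mem_ofList, List.mem_filter]
    simp

-- ===== VERDICT (by name: the statement is the Claim_ definition above) =====
theorem helper_spec : Claim_equal_helper := by
  intro l num _ _
  unfold Spec_helper
  rw [helper_eq_bottom, alt_eq_bottom]
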